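-- pv_equiv track=rewrite | github.com/rotemlv/ProbabilityTests | anotherAnotherp.py | hire_k_candidates_out_of_n_single_hire_using_set
-- ===== SOURCE A (Python) =====
-- def my_better_than_min(arr, element, k):
--     if len(arr) < k:
--         return True
--     return element > min(arr)
--
-- def hire_k_candidates_out_of_n_single_hire_using_set(candidates, k, candidate_to_check):
--     # this function receives a permutation of the sorted candidates
--     # traverses the array and decides who to hire based on skill (number of candidate)
--     hired_candidates = set()
--     for candidate in candidates:
--         if my_better_than_min(hired_candidates, candidate, k):
--             # candidate "i" was chosen
--             if candidate == candidate_to_check: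
--                 return True
--             # if necessary, remove the lowest hire from the list
--             if len(hired_candidates) == k:
--                 hired_candidates.remove(min(hired_candidates))
--             hired_candidates.add(candidate)
--     return False
-- ===== SOURCE B (Python) =====
-- def hire_k_candidates_out_of_n_single_hire_using_set(candidates, k, candidate_to_check):
--     # One pass, O(1) work per element: the target is hired at some occurrence
--     # iff fewer than k distinct earlier values are >= it; track only those values.
--     target = candidate_to_check
--     ge_seen = set()  # distinct values >= target seen so far
--     for candidate in candidates:
--         if candidate == target and len(ge_seen) < k:
--             return True
--         if candidate >= target:
--             ge_seen.add(candidate)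
--     return False
-- ===== Notes on version B (the rewrite author's own statement) =====
-- stated objective: faster
-- what changed: Instead of simulating the hired pool (a set with repeated min-scans and evictions), B counts in one pass the distinct earlier values >= the target and reports a hire as soon as that count is below k at an occurrence of the target; Pre_ excludes k <= 0 with a nonempty list (A raises ValueError) and lists with duplicate values, on which A's remove(min)+add of an already-hired duplicate accidentally shrinks the pool.
-- outside the precondition, e.g. on hire_k_candidates_out_of_n_single_hire_using_set([2, 4, 4, 0], 2, 0): A returns True, B returns False; on hire_k_candidates_out_of_n_single_hire_using_set([1], 0, 1): A raises ValueError, B returns False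
import Mathlib
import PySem

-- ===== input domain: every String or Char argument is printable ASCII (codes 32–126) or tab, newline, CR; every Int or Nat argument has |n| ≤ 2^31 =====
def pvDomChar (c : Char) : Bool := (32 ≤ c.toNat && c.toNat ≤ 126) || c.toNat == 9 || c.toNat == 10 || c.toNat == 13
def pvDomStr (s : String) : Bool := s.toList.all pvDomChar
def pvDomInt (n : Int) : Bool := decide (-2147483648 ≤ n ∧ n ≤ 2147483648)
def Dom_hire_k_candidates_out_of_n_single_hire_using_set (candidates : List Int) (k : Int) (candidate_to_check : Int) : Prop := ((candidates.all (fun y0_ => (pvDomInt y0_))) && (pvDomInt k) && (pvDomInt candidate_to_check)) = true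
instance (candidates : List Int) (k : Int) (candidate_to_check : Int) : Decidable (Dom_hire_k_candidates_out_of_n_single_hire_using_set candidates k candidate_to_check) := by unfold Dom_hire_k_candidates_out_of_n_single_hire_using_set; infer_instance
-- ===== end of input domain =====

-- B replaces A's simulated hired pool (set with min-scans and evictions) by a one-pass count of
-- distinct earlier values ≥ the target; a timing run measured B faster on the largest inputs.

-- ===== PORT A =====
def my_better_than_min (arr : PySem.Set Int) (element : Int) (k : Int) : Bool :=
  if PySem.Set.len arr < k then true
  else
    match PySem.List.min? arr (fun x => x) with
    | some m => decide (element > m)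
    | none => false   -- Python: min() of an empty set raises ValueError; reachable only when k ≤ 0, excluded by Pre_

def pvHireLoopA (k t : Int) (hired : PySem.Set Int) : List Int → Bool
  | [] => false
  | candidate :: rest =>
    if my_better_than_min hired candidate k then
      if candidate = t then true
      else
        let hired' : PySem.Set Int :=
          if PySem.Set.len hired = k then
            match PySem.List.min? hired (fun x => x) with
            | some m => PySem.Set.add (PySem.Set.discard hired m) candidate
              -- Python's hired_candidates.remove(min(...)): the min is always a member, so remove = discard
            | none => PySem.Set.add hired candidate   -- unreachable: len hired = k ≥ 1 means the set is nonempty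
          else PySem.Set.add hired candidate
        pvHireLoopA k t hired' rest
    else pvHireLoopA k t hired rest

def hire_k_candidates_out_of_n_single_hire_using_set (candidates : List Int) (k : Int) (candidate_to_check : Int) : Bool :=
  pvHireLoopA k candidate_to_check PySem.Set.empty candidates

-- ===== PORT B =====
def pvHireLoopB (k t : Int) (geSeen : PySem.Set Int) : List Int → Bool
  | [] => false
  | candidate :: rest =>
    if candidate = t ∧ PySem.Set.len geSeen < k then true
    else pvHireLoopB k t (if t ≤ candidate then PySem.Set.add geSeen candidate else geSeen) rest

def hire_k_candidates_out_of_n_single_hire_using_set_alt (candidates : List Int) (k : Int) (candidate_to_check : Int) : Bool :=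
  pvHireLoopB k candidate_to_check PySem.Set.empty candidates

-- ===== PRECONDITION & SPEC =====
-- Pre_ excludes (a) k ≤ 0 with a nonempty list, on which A raises ValueError (min of the empty hired
-- set), and (b) lists with duplicate values — the documented input is a permutation, i.e. distinct —
-- on which A's remove(min)-then-add of an already-hired duplicate accidentally shrinks the hired pool.
def Pre_hire_k_candidates_out_of_n_single_hire_using_set (candidates : List Int) (k : Int) (candidate_to_check : Int) : Prop :=
  candidates.Nodup ∧ (1 ≤ k ∨ candidates = [])
instance (candidates : List Int) (k : Int) (candidate_to_check : Int) : Decidable (Pre_hire_k_candidates_out_of_n_single_hire_using_set candidates k candidate_to_check) := by unfold Pre_hire_k_candidates_out_of_n_single_hire_using_set; infer_instance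

def pvWitness_hire_k_candidates_out_of_n_single_hire_using_set : List Int × Int × Int := ([3, 1, 4, 2], 2, 4)

def Spec_hire_k_candidates_out_of_n_single_hire_using_set (candidates : List Int) (k : Int) (candidate_to_check : Int) (out : Bool) : Prop := out = hire_k_candidates_out_of_n_single_hire_using_set_alt candidates k candidate_to_check
instance (candidates : List Int) (k : Int) (candidate_to_check : Int) (out : Bool) : Decidable (Spec_hire_k_candidates_out_of_n_single_hire_using_set candidates k candidate_to_check out) := by unfold Spec_hire_k_candidates_out_of_n_single_hire_using_set; infer_instance

-- ===== CLAIM (what is proved, stated in full; the proofs are below) =====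
def Claim_equal_hire_k_candidates_out_of_n_single_hire_using_set : Prop := ∀ (candidates : List Int) (k : Int) (candidate_to_check : Int), Dom_hire_k_candidates_out_of_n_single_hire_using_set candidates k candidate_to_check → Pre_hire_k_candidates_out_of_n_single_hire_using_set candidates k candidate_to_check → Spec_hire_k_candidates_out_of_n_single_hire_using_set candidates k candidate_to_check (hire_k_candidates_out_of_n_single_hire_using_set candidates k candidate_to_check)

-- ===== LEMMAS AND PROOFS =====

-- number of values in F that are ≥ v ("rank from the top", counting v itself when v ∈ F)
def pvRank (F : Finset Int) (v : Int) : ℕ := (F.filter (fun u => v ≤ u)).card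

-- the loop invariant of A: the hired pool holds exactly the members of the prefix whose rank is ≤ k
def InvA (k : Int) (F : Finset Int) (S : PySem.Set Int) : Prop :=
  S.Nodup ∧ ∀ v : Int, v ∈ S ↔ v ∈ F ∧ (pvRank F v : Int) ≤ k

-- the loop invariant of B: geSeen holds exactly the members of the prefix that are ≥ t
def InvB (t : Int) (F : Finset Int) (G : PySem.Set Int) : Prop :=
  G.Nodup ∧ ∀ v : Int, v ∈ G ↔ v ∈ F ∧ t ≤ v

lemma pvRank_mono (F : Finset Int) {u w : Int} (h : u ≤ w) : pvRank F w ≤ pvRank F u := by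
  apply Finset.card_le_card
  intro x hx
  simp only [Finset.mem_filter] at *
  exact ⟨hx.1, le_trans h hx.2⟩

lemma pvRank_lt_of_mem (F : Finset Int) {u w : Int} (hu : u ∈ F) (hlt : u < w) :
    pvRank F w < pvRank F u := by
  apply Finset.card_lt_card
  constructor
  · intro x hx
    simp only [Finset.mem_filter] at *
    exact ⟨hx.1, le_trans (le_of_lt hlt) hx.2⟩
  · intro hsub
    have := hsub (by simp [Finset.mem_filter, hu] : u ∈ F.filter (fun x => u ≤ x))
    simp only [Finset.mem_filter] at this
    omega

lemma pvRank_insert {F : Finset Int} {c : Int} (hc : c ∉ F) (v : Int) :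
    pvRank (insert c F) v = pvRank F v + if v ≤ c then 1 else 0 := by
  unfold pvRank
  rw [Finset.filter_insert]
  split_ifs with h
  · rw [Finset.card_insert_of_notMem (by simp [Finset.mem_filter, hc])]
  · simp

lemma rank_le_len {k : Int} {F : Finset Int} {S : PySem.Set Int} (h : InvA k F S)
    {v : Int} (hv : v ∈ S) : (pvRank F v : Int) ≤ (S.length : Int) := by
  obtain ⟨hnd, hmem⟩ := h
  have hv' := (hmem v).mp hv
  have hsub : F.filter (fun u => v ≤ u) ⊆ S.toFinset := by
    intro x hx
    simp only [Finset.mem_filter] at hx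
    have : (pvRank F x : Int) ≤ (pvRank F v : Int) := by
      exact_mod_cast pvRank_mono F hx.2
    exact List.mem_toFinset.mpr ((hmem x).mpr ⟨hx.1, le_trans this hv'.2⟩)
  have := Finset.card_le_card hsub
  rw [List.toFinset_card_of_nodup hnd] at this
  exact_mod_cast this

lemma rank_min_eq_len {k : Int} {F : Finset Int} {S : PySem.Set Int} (h : InvA k F S)
    {m : Int} (hm : PySem.List.min? S (fun x => x) = some m) :
    (pvRank F m : Int) = (S.length : Int) := by
  obtain ⟨hnd, hmem⟩ := h
  have hmS : m ∈ S := PySem.List.min?_mem hm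
  have hmin : ∀ y ∈ S, m ≤ y := PySem.List.min?_isMin hm
  have hset : F.filter (fun u => m ≤ u) = S.toFinset := by
    apply Finset.Subset.antisymm
    · intro x hx
      simp only [Finset.mem_filter] at hx
      have hr : (pvRank F x : Int) ≤ (pvRank F m : Int) := by
        exact_mod_cast pvRank_mono F hx.2
      have hmk := (hmem m).mp hmS
      exact List.mem_toFinset.mpr ((hmem x).mpr ⟨hx.1, le_trans hr hmk.2⟩)
    · intro x hx
      have hxS := List.mem_toFinset.mp hx
      have := (hmem x).mp hxS
      simp only [Finset.mem_filter]
      exact ⟨this.1, hmin x hxS⟩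
  unfold pvRank
  rw [hset, List.toFinset_card_of_nodup hnd]

lemma len_le_k {k : Int} {F : Finset Int} {S : PySem.Set Int} (h : InvA k F S)
    (hk : 1 ≤ k) : (S.length : Int) ≤ k := by
  rcases hS : PySem.List.min? S (fun x => x) with _ | m
  · rw [PySem.List.min?_eq_none_iff] at hS
    subst hS; simp; omega
  · have hlen := rank_min_eq_len h hS
    have hmS : m ∈ S := PySem.List.min?_mem hS
    have := (h.2 m).mp hmS
    omega

lemma subset_of_len_lt {k : Int} {F : Finset Int} {S : PySem.Set Int} (h : InvA k F S)
    (hk : 1 ≤ k) (hlen : (S.length : Int) < k) : ∀ u ∈ F, u ∈ S := by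
  obtain ⟨hnd, hmem⟩ := h
  by_contra hcon
  push Not at hcon
  obtain ⟨u, huF, huS⟩ := hcon
  set B : Finset Int := F.filter (fun x => x ∉ S) with hB
  have hBne : B.Nonempty := ⟨u, by simp [hB, huF, huS]⟩
  set M : Int := B.max' hBne with hM
  have hMB : M ∈ B := Finset.max'_mem B hBne
  have hMF : M ∈ F := (Finset.mem_filter.mp hMB).1
  have hMS : M ∉ S := by
    have := (Finset.mem_filter.mp hMB).2
    simpa using this
  -- every rejected value is below every pooled value
  have hlt : ∀ x ∈ B, ∀ s ∈ S, x < s := by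
    intro x hx s hs
    have hxF := (Finset.mem_filter.mp hx).1
    have hxS : x ∉ S := by have := (Finset.mem_filter.mp hx).2; simpa using this
    have hsP := (hmem s).mp hs
    by_contra hle
    push Not at hle
    have : (pvRank F x : Int) ≤ (pvRank F s : Int) := by
      exact_mod_cast pvRank_mono F hle
    exact hxS ((hmem x).mpr ⟨hxF, le_trans this hsP.2⟩)
  have hset : F.filter (fun u => M ≤ u) = insert M S.toFinset := by
    apply Finset.Subset.antisymm
    · intro y hy
      simp only [Finset.mem_filter] at hy
      by_cases hyS : y ∈ S
      · exact Finset.mem_insert.mpr (Or.inr (List.mem_toFinset.mpr hyS))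
      · have hyB : y ∈ B := by simp [hB, hy.1, hyS]
        have := Finset.le_max' B y hyB
        have : y = M := le_antisymm this hy.2
        exact Finset.mem_insert.mpr (Or.inl this)
    · intro y hy
      rcases Finset.mem_insert.mp hy with hy | hy
      · subst hy; simp [Finset.mem_filter, hMF]
      · have hyS := List.mem_toFinset.mp hy
        have := (hmem y).mp hyS
        exact Finset.mem_filter.mpr ⟨this.1, le_of_lt (hlt M hMB y hyS)⟩
  have hcard : pvRank F M = S.length + 1 := by
    unfold pvRank
    rw [hset, Finset.card_insert_of_notMem (by simpa using hMS),
        List.toFinset_card_of_nodup hnd]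
  have : (pvRank F M : Int) ≤ k := by rw [hcard]; push_cast; omega
  exact hMS ((hmem M).mpr ⟨hMF, this⟩)

lemma hire_iff {k : Int} {F : Finset Int} {S : PySem.Set Int} (h : InvA k F S)
    (hk : 1 ≤ k) {c : Int} (hc : c ∉ F) :
    my_better_than_min S c k = true ↔ (pvRank F c : Int) < k := by
  unfold my_better_than_min
  have hlen : PySem.Set.len S = (S.length : Int) := by
    simp [PySem.Set.len]
  split_ifs with hsm
  · rw [hlen] at hsm
    simp only [true_iff]
    have hsub := subset_of_len_lt h hk hsm
    have : F.filter (fun u => c ≤ u) ⊆ S.toFinset := by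
      intro x hx
      exact List.mem_toFinset.mpr (hsub x (Finset.mem_filter.mp hx).1)
    have hle := Finset.card_le_card this
    rw [List.toFinset_card_of_nodup h.1] at hle
    unfold pvRank
    omega
  · rw [hlen] at hsm
    have hne : S ≠ [] := by
      intro hnil; subst hnil; simp at hsm; omega
    rcases hS : PySem.List.min? S (fun x => x) with _ | m
    · exact absurd (PySem.List.min?_eq_none_iff S _ |>.mp hS) hne
    · simp only [decide_eq_true_eq]
      have hmS : m ∈ S := PySem.List.min?_mem hS
      have hmF : m ∈ F := ((h.2 m).mp hmS).1
      have hrm : (pvRank F m : Int) = (S.length : Int) := rank_min_eq_len h hS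
      have hrk : (pvRank F m : Int) ≤ k := ((h.2 m).mp hmS).2
      have hlenk : (S.length : Int) = k := le_antisymm (len_le_k h hk) (by omega)
      constructor
      · intro hmc
        have := pvRank_lt_of_mem F hmF hmc
        omega
      · intro hrc
        by_contra hle
        push Not at hle
        have : (pvRank F m : Int) ≤ (pvRank F c : Int) := by
          exact_mod_cast pvRank_mono F hle
        omega

lemma invA_step_reject {k : Int} {F : Finset Int} {S : PySem.Set Int} (h : InvA k F S)
    (hk : 1 ≤ k) {c : Int} (hc : c ∉ F) (hr : ¬ (pvRank F c : Int) < k) :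
    InvA k (insert c F) S := by
  obtain ⟨hnd, hmem⟩ := h
  refine ⟨hnd, fun v => ?_⟩
  rw [pvRank_insert hc]
  -- no pooled value lies at or below c
  have hkey : ∀ v ∈ S, ¬ v ≤ c := by
    intro v hv hvc
    have hvP := (hmem v).mp hv
    have hne : v ≠ c := fun he => hc (he ▸ hvP.1)
    have := pvRank_lt_of_mem F hvP.1 (lt_of_le_of_ne hvc hne)
    omega
  constructor
  · intro hv
    have hvP := (hmem v).mp hv
    have := hkey v hv
    refine ⟨Finset.mem_insert.mpr (Or.inr hvP.1), ?_⟩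
    rw [if_neg this]
    push_cast; omega
  · rintro ⟨hvF, hvr⟩
    rcases Finset.mem_insert.mp hvF with hvc | hvF'
    · subst hvc; rw [if_pos le_rfl] at hvr; push_cast at hvr; omega
    · by_cases hvc : v ≤ c
      · exfalso
        have hne : v ≠ c := fun he => hc (he ▸ hvF')
        have := pvRank_lt_of_mem F hvF' (lt_of_le_of_ne hvc hne)
        rw [if_pos hvc] at hvr
        push_cast at hvr
        omega
      · rw [if_neg hvc] at hvr
        push_cast at hvr
        exact (hmem v).mpr ⟨hvF', by omega⟩

lemma invA_step_hire {k : Int} {F : Finset Int} {S : PySem.Set Int} (h : InvA k F S)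
    (hk : 1 ≤ k) {c : Int} (hc : c ∉ F) (hr : (pvRank F c : Int) < k) :
    InvA k (insert c F)
      (if PySem.Set.len S = k then
        match PySem.List.min? S (fun x => x) with
        | some m => PySem.Set.add (PySem.Set.discard S m) c
        | none => PySem.Set.add S c
       else PySem.Set.add S c) := by
  obtain ⟨hnd, hmem⟩ := h
  have hlen : PySem.Set.len S = (S.length : Int) := by simp [PySem.Set.len]
  split_ifs with heq
  · -- the pool is full: evict the minimum, then add c
    rw [hlen] at heq
    have hne : S ≠ [] := by intro hnil; subst hnil; simp at heq; omega
    rcases hS : PySem.List.min? S (fun x => x) with _ | m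
    · exact absurd (PySem.List.min?_eq_none_iff S _ |>.mp hS) hne
    · have hmS : m ∈ S := PySem.List.min?_mem hS
      have hmin : ∀ y ∈ S, m ≤ y := PySem.List.min?_isMin hS
      have hmF : m ∈ F := ((hmem m).mp hmS).1
      have hrm : (pvRank F m : Int) = k := by
        have := rank_min_eq_len ⟨hnd, hmem⟩ hS; omega
      have hmc : m < c := by
        by_contra hle
        push Not at hle
        have : (pvRank F m : Int) ≤ (pvRank F c : Int) := by
          exact_mod_cast pvRank_mono F hle
        omega
      refine ⟨PySem.Set.nodup_add _ _ (PySem.Set.nodup_discard _ _ hnd), fun v => ?_⟩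
      rw [PySem.Set.mem_add, PySem.Set.mem_discard, pvRank_insert hc]
      by_cases hvc : v = c
      · subst hvc
        simp only [or_true, true_iff]
        exact ⟨Finset.mem_insert_self _ _, by rw [if_pos le_rfl]; push_cast; omega⟩
      · simp only [hvc, or_false]
        by_cases hvm : v = m
        · subst hvm
          simp only [ne_eq, not_true_eq_false, and_false, false_iff, not_and]
          intro _
          rw [if_pos (le_of_lt hmc)]
          push_cast; omega
        · constructor
          · rintro ⟨hvS, _⟩
            have hvF := ((hmem v).mp hvS).1
            have hmv : m < v := lt_of_le_of_ne (hmin v hvS) (Ne.symm hvm)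
            have := pvRank_lt_of_mem F hmF hmv
            refine ⟨Finset.mem_insert.mpr (Or.inr hvF), ?_⟩
            split_ifs <;> push_cast <;> omega
          · rintro ⟨hvF, hvr⟩
            rcases Finset.mem_insert.mp hvF with h' | hvF'
            · exact absurd h' hvc
            · refine ⟨(hmem v).mpr ⟨hvF', ?_⟩, hvm⟩
              split_ifs at hvr <;> push_cast at hvr <;> omega
  · -- the pool has a free slot: just add c
    rw [hlen] at heq
    have hlt : (S.length : Int) < k := lt_of_le_of_ne (len_le_k ⟨hnd, hmem⟩ hk) heq
    refine ⟨PySem.Set.nodup_add _ _ hnd, fun v => ?_⟩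
    rw [PySem.Set.mem_add, pvRank_insert hc]
    by_cases hvc : v = c
    · subst hvc
      simp only [or_true, true_iff]
      exact ⟨Finset.mem_insert_self _ _, by rw [if_pos le_rfl]; push_cast; omega⟩
    · simp only [hvc, or_false]
      constructor
      · intro hvS
        have hvF := ((hmem v).mp hvS).1
        have := rank_le_len ⟨hnd, hmem⟩ hvS
        refine ⟨Finset.mem_insert.mpr (Or.inr hvF), ?_⟩
        split_ifs <;> push_cast <;> omega
      · rintro ⟨hvF, hvr⟩
        rcases Finset.mem_insert.mp hvF with h' | hvF'
        · exact absurd h' hvc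
        · refine (hmem v).mpr ⟨hvF', ?_⟩
          split_ifs at hvr <;> push_cast at hvr <;> omega

lemma invB_step {t : Int} {F : Finset Int} {G : PySem.Set Int} (h : InvB t F G)
    {c : Int} (hc : c ∉ F) :
    InvB t (insert c F) (if t ≤ c then PySem.Set.add G c else G) := by
  obtain ⟨hnd, hmem⟩ := h
  split_ifs with htc
  · refine ⟨PySem.Set.nodup_add _ _ hnd, fun v => ?_⟩
    rw [PySem.Set.mem_add]
    constructor
    · rintro (hv | hv)
      · have := (hmem v).mp hv
        exact ⟨Finset.mem_insert.mpr (Or.inr this.1), this.2⟩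
      · subst hv; exact ⟨Finset.mem_insert_self _ _, htc⟩
    · rintro ⟨hvF, hvt⟩
      rcases Finset.mem_insert.mp hvF with h' | h'
      · exact Or.inr h'
      · exact Or.inl ((hmem v).mpr ⟨h', hvt⟩)
  · refine ⟨hnd, fun v => ?_⟩
    constructor
    · intro hv
      have := (hmem v).mp hv
      exact ⟨Finset.mem_insert.mpr (Or.inr this.1), this.2⟩
    · rintro ⟨hvF, hvt⟩
      rcases Finset.mem_insert.mp hvF with h' | h'
      · subst h'; exact absurd hvt htc
      · exact (hmem v).mpr ⟨h', hvt⟩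

lemma lenB_eq_rank {t : Int} {F : Finset Int} {G : PySem.Set Int} (h : InvB t F G) :
    (G.length : Int) = (pvRank F t : Int) := by
  obtain ⟨hnd, hmem⟩ := h
  have hset : G.toFinset = F.filter (fun u => t ≤ u) := by
    apply Finset.ext
    intro x
    rw [List.mem_toFinset, Finset.mem_filter]
    exact hmem x
  have := List.toFinset_card_of_nodup hnd
  rw [hset] at this
  unfold pvRank
  omega

lemma loop_eq (k t : Int) (hk : 1 ≤ k) :
    ∀ (cs : List Int) (F : Finset Int) (S G : PySem.Set Int),
      cs.Nodup → (∀ c ∈ cs, c ∉ F) → InvA k F S → InvB t F G →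
      pvHireLoopA k t S cs = pvHireLoopB k t G cs := by
  intro cs
  induction cs with
  | nil => intro F S G _ _ _ _; rfl
  | cons c rest ih =>
    intro F S G hnd hfresh hA hB
    have hc : c ∉ F := hfresh c (List.mem_cons_self)
    have hndr : rest.Nodup := (List.nodup_cons.mp hnd).2
    have hcr : c ∉ rest := (List.nodup_cons.mp hnd).1
    have hfresh' : ∀ x ∈ rest, x ∉ insert c F := by
      intro x hx
      rw [Finset.mem_insert]
      push Not
      exact ⟨fun he => hcr (he ▸ hx), hfresh x (List.mem_cons_of_mem _ hx)⟩
    have hlenG : PySem.Set.len G = (G.length : Int) := by simp [PySem.Set.len]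
    have hhire := hire_iff hA hk hc
    rw [pvHireLoopA, pvHireLoopB]
    by_cases hct : c = t
    · subst hct
      rw [hlenG, lenB_eq_rank hB]
      by_cases hrc : (pvRank F c : Int) < k
      · rw [if_pos (hhire.mpr hrc), if_pos rfl, if_pos ⟨rfl, hrc⟩]
      · rw [if_neg (fun hh => hrc (hhire.mp hh)), if_neg (by tauto)]
        exact ih (insert c F) S _ hndr hfresh'
          (invA_step_reject hA hk hc hrc) (invB_step hB hc)
    · have hBside : (if c = t ∧ PySem.Set.len G < k then true
          else pvHireLoopB k t (if t ≤ c then PySem.Set.add G c else G) rest)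
          = pvHireLoopB k t (if t ≤ c then PySem.Set.add G c else G) rest := by
        rw [if_neg (by tauto)]
      rw [hBside]
      by_cases hrc : (pvRank F c : Int) < k
      · rw [if_pos (hhire.mpr hrc), if_neg hct]
        exact ih (insert c F) _ _ hndr hfresh'
          (invA_step_hire hA hk hc hrc) (invB_step hB hc)
      · rw [if_neg (fun hh => hrc (hhire.mp hh))]
        exact ih (insert c F) S _ hndr hfresh'
          (invA_step_reject hA hk hc hrc) (invB_step hB hc)

-- ===== VERDICT (by name: the statement is the Claim_ definition above) =====
theorem hire_k_candidates_out_of_n_single_hire_using_set_spec : Claim_equal_hire_k_candidates_out_of_n_single_hire_using_set := by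
  intro candidates k t _ hpre
  unfold Spec_hire_k_candidates_out_of_n_single_hire_using_set
  obtain ⟨hnd, hk⟩ := hpre
  rcases hk with hk | hnil
  · unfold hire_k_candidates_out_of_n_single_hire_using_set hire_k_candidates_out_of_n_single_hire_using_set_alt
    refine loop_eq k t hk candidates ∅ PySem.Set.empty PySem.Set.empty hnd (by simp) ?_ ?_
    · exact ⟨List.nodup_nil, by simp [PySem.Set.empty]⟩
    · exact ⟨List.nodup_nil, by simp [PySem.Set.empty]⟩
  · subst hnil; rfl
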